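-- pv_equiv track=rewrite | github.com/allenwind/machine-learning-in-text-classification | tokenizer.py | ngram_tokenizer
-- ===== SOURCE A (Python) =====
-- def ngram_tokenizer(s, n=2):
--     # n-gram 方式分词
--     r = []
--     if len(s) <= n:
--         r.append(s)
--         return r
--     for i in range(len(s)-n+1):
--         r.append(s[i:i+n])
--     return r
-- ===== SOURCE B (Python) =====
-- def ngram_tokenizer(s, n=2):
--     if len(s) <= n:
--         return [s]
--     # transpose n shifted views of s; each column is one n-gram
--     return [''.join(t) for t in zip(*(s[i:] for i in range(n)))]
-- ===== Notes on version B (the rewrite author's own statement) =====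
-- stated objective: alternative
-- what changed: B replaces A's index scan over range(len(s)-n+1) with a transpose of n shifted views of the string (zip(*(s[i:] for i in range(n)))), joining each column into an n-gram; same guard for len(s) <= n.
-- outside the precondition, e.g. on ngram_tokenizer('ab', 0): A returns ['', '', ''], B returns []; on ngram_tokenizer('xy', -1): A returns ['x', '', '', ''], B returns []
import Mathlib
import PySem

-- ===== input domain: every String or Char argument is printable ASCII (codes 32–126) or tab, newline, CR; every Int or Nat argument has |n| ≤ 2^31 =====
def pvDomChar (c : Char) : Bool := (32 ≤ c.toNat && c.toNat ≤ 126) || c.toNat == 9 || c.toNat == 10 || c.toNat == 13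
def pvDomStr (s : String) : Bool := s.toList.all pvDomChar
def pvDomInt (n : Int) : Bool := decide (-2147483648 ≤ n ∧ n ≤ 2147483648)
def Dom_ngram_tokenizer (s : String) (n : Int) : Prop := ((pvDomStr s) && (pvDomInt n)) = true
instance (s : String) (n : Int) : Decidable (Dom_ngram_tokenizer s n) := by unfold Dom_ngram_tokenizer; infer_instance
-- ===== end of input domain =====

-- B builds the n-grams by transposing the n shifted views s[0:], …, s[n-1:]
-- (column-wise zip) instead of A's index scan; equal return values on Pre_ (no mutation).

-- ===== PORT A =====
-- r = []; if len(s) <= n: r.append(s); return r; for i in range(len(s)-n+1): r.append(s[i:i+n]); return r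
def ngram_tokenizer (s : String) (n : Int) : List String :=
  let r : List String := []
  if PySem.Str.len s ≤ n then r ++ [s]
  else
    (PySem.List.pyRange 0 (PySem.Str.len s - n + 1) 1).foldl
      (fun r i => r ++ [PySem.Str.slice s (some i) (some (i + n))]) r

-- ===== PORT B =====
-- zip(*cols): take one head from every column while all are nonempty (Python's zip stops at the shortest)
def pvZip (cols : List (List Char)) : List (List Char) :=
  if h : cols = [] ∨ cols.any List.isEmpty then []
  else (cols.map (fun c => c.headD ' ')) :: pvZip (cols.map List.tail)
termination_by (cols.map List.length).sum
decreasing_by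
  simp only [not_or, List.any_eq_true, not_exists, not_and] at h
  obtain ⟨h1, h2⟩ := h
  have e : (List.map List.length (List.map (fun x : {x // x ∈ cols} => (↑x : List Char).tail) cols.attach)).sum
      = (cols.map (fun c => c.tail.length)).sum := by simp [List.map_map, -List.length_tail]; rfl
  rw [e]
  apply List.sum_lt_sum (fun c => c.tail.length) List.length
  · intro c _; simp [List.length_tail]
  · obtain ⟨c, hc⟩ := List.exists_mem_of_ne_nil cols h1
    refine ⟨c, hc, ?_⟩
    have := h2 c hc
    cases c with
    | nil => simp at this
    | cons a t => simp

-- [''.join(t) for t in zip(*(s[i:] for i in range(n)))]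
def ngram_tokenizer_alt (s : String) (n : Int) : List String :=
  if PySem.Str.len s ≤ n then [s]
  else
    (pvZip ((PySem.List.pyRange 0 n 1).map (fun i => (PySem.Str.slice s (some i) none).toList))).map
      (fun t => String.ofList (PySem.Chars.join [] (t.map (fun c => [c]))))

-- ===== PRECONDITION & SPEC =====
-- Pre_ excludes non-positive n on inputs that miss the guard: n-grams with n ≤ 0 are
-- unspecified, A's list of empty slice artefacts and B's [] are both accidents there.
def Pre_ngram_tokenizer (s : String) (n : Int) : Prop := 1 ≤ n ∨ PySem.Str.len s ≤ n
instance (s : String) (n : Int) : Decidable (Pre_ngram_tokenizer s n) := by unfold Pre_ngram_tokenizer; infer_instance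
def pvWitness_ngram_tokenizer : String × Int := ("hello", 2)

def Spec_ngram_tokenizer (s : String) (n : Int) (out : List String) : Prop := out = ngram_tokenizer_alt s n
instance (s : String) (n : Int) (out : List String) : Decidable (Spec_ngram_tokenizer s n out) := by unfold Spec_ngram_tokenizer; infer_instance

-- ===== CLAIM (what is proved, stated in full; the proofs are below) =====
def Claim_equal_ngram_tokenizer : Prop := ∀ (s : String) (n : Int), Dom_ngram_tokenizer s n → Pre_ngram_tokenizer s n → Spec_ngram_tokenizer s n (ngram_tokenizer s n)

-- ===== LEMMAS AND PROOFS =====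

theorem pvZip_nil_of_short (m : Nat) (hm : 1 ≤ m) (l : List Char) (hlen : l.length < m) :
    pvZip ((List.range m).map (fun i => l.drop i)) = [] := by
  rw [pvZip]
  rw [dif_pos]
  right
  simp only [List.any_eq_true, List.mem_map]
  refine ⟨l.drop (m-1), ⟨m-1, by simp [List.mem_range]; omega, rfl⟩, ?_⟩
  simp [List.isEmpty_iff, List.drop_eq_nil_iff]
  omega

theorem pvZip_shift (m : Nat) (hm : 1 ≤ m) (l : List Char) :
    pvZip ((List.range m).map (fun i => l.drop i)) =
      (List.range (l.length + 1 - m)).map (fun k => (l.drop k).take m) := by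
  induction l with
  | nil =>
    rw [pvZip_nil_of_short m hm [] (by simpa using hm)]
    have : (0 : Nat) + 1 - m = 0 := by omega
    simp [this]
  | cons a t ih =>
    by_cases hlen : (a :: t).length < m
    · rw [pvZip_nil_of_short m hm _ hlen]
      have hz : t.length + 1 + 1 - m = 0 := by simp at hlen; omega
      simp [hz]
    · rw [not_lt] at hlen
      simp only [List.length_cons] at hlen
      rw [pvZip]
      rw [dif_neg]
      · have htails : (List.map (fun i => (a :: t).drop i) (List.range m)).map List.tail
            = (List.range m).map (fun i => t.drop i) := by
          rw [List.map_map]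
          apply List.map_congr_left
          intro i hi
          simp only [Function.comp_apply, List.tail_drop, List.drop_succ_cons]
        have hheads : (List.map (fun i => (a :: t).drop i) (List.range m)).map (fun c => c.headD ' ')
            = (a :: t).take m := by
          rw [List.map_map]
          apply List.ext_getElem
          · simp
            omega
          · intro k h1 h2
            simp only [List.getElem_map, List.getElem_range, Function.comp_apply,
              List.getElem_take]
            rw [List.headD_eq_head?_getD, List.head?_drop]
            have hk : k < (a :: t).length := by simp at h1; simp; omega
            simp [List.getElem?_eq_getElem hk]
        rw [htails, ih, hheads]
        have hN : t.length + 1 + 1 - m = (t.length + 1 - m) + 1 := by omega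
        simp only [List.length_cons]
        rw [hN, List.range_succ_eq_map]
        simp only [List.map_cons, List.map_map, List.drop_zero]
        congr 1
      · simp only [not_or, List.any_eq_true, List.mem_map, not_exists, not_and]
        constructor
        · have h0 : (0:Nat) ∈ List.range m := by simp [List.mem_range]; omega
          intro hnil
          rw [List.map_eq_nil_iff] at hnil
          simp [hnil] at h0
        · rintro x ⟨i, hi, rfl⟩
          simp only [List.mem_range] at hi
          simp only [List.isEmpty_iff, List.drop_eq_nil_iff]
          simp only [List.length_cons]
          omega

-- ===== VERDICT (by name: the statement is the Claim_ definition above) =====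
theorem ngram_tokenizer_spec : Claim_equal_ngram_tokenizer := by
  intro s n _hdom hpre
  unfold Spec_ngram_tokenizer ngram_tokenizer ngram_tokenizer_alt
  by_cases hg : PySem.Str.len s ≤ n
  · rw [if_pos hg, if_pos hg]
    simp
  · rw [if_neg hg, if_neg hg]
    have hn : 1 ≤ n := hpre.resolve_right hg
    obtain ⟨m, rfl⟩ : ∃ m : Nat, n = (m : Int) := ⟨n.toNat, (Int.toNat_of_nonneg (by omega)).symm⟩
    have hm1 : 1 ≤ m := by exact_mod_cast hn
    have hml : m < s.toList.length := by
      rw [PySem.Str.len_eq] at hg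
      exact_mod_cast not_le.mp hg
    rw [PySem.List.foldl_append_singleton_eq_map, PySem.Str.len_eq,
        PySem.List.pyRange_one, PySem.List.pyRange_one]
    have hcols : List.map (fun i => (PySem.Str.slice s (some i) none).toList)
        (List.map (fun k : Nat => (0:Int) + ↑k) (List.range ((↑m : Int) - 0).toNat))
        = (List.range m).map (fun i => s.toList.drop i) := by
      rw [List.map_map]
      have hm0 : ((↑m : Int) - 0).toNat = m := by omega
      rw [hm0]
      apply List.map_congr_left
      intro k _
      simp only [Function.comp_apply, zero_add, PySem.Str.toList_slice,
        PySem.Chars.slice_eq_listSlice, PySem.List.slice_from_natCast]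
    rw [hcols, pvZip_shift m hm1, List.nil_append]
    have hc : ((s.toList.length : Int) - (↑m : Int) + 1 - 0).toNat = s.toList.length + 1 - m := by
      omega
    rw [hc, List.map_map, List.map_map]
    apply List.map_congr_left
    intro k _
    simp only [Function.comp_apply, zero_add, PySem.Chars.join_nil_singletons]
    simp only [PySem.Str.slice, PySem.Chars.slice_eq_listSlice]
    rw [PySem.List.slice_natCast_add]
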